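-- pv_equiv track=rewrite | github.com/NodirrDev/mohirdev-tasks | csci1133/hw02files/hw11.py | closest_price
-- ===== SOURCE A (Python) =====
-- def closest_price(guesses, true_cost):
--     '''
--     Purpose:
--     Checks list guesses recursively to find the guess that is closest to
--     true_cost but not over it. Function returns 0 if all the guesses are more than
--     true_cost.
--     Parameter(s):
--     guesses: non-empty list of positive integers, stores tha guesses of contestants
--     true_cost: integer, actual price
--     Return Value:
--     integer, value that is closest to true cost but not over it. returns 0
--     if all guesses are over true_cost.
--     '''
--
--     if guesses == []:
--         return 0
--     else:
--         if guesses[0] <= true_cost: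
--             return max(guesses[0], closest_price(guesses[1:], true_cost))
--         else:
--             return closest_price(guesses[1:], true_cost)
-- ===== SOURCE B (Python) =====
-- def closest_price(guesses, true_cost):
--     for g in sorted(guesses, reverse=True):
--         if 0 <= g <= true_cost:
--             return g
--     return 0
-- ===== Notes on version B (the rewrite author's own statement) =====
-- stated objective: faster
-- what changed: Replaces per-element recursion (with O(n) guesses[1:] slicing at each step) folding max over the tail by sorted(guesses, reverse=True) plus an early-exit scan returning the first nonnegative guess not exceeding true_cost, else 0.
import Mathlib
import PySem

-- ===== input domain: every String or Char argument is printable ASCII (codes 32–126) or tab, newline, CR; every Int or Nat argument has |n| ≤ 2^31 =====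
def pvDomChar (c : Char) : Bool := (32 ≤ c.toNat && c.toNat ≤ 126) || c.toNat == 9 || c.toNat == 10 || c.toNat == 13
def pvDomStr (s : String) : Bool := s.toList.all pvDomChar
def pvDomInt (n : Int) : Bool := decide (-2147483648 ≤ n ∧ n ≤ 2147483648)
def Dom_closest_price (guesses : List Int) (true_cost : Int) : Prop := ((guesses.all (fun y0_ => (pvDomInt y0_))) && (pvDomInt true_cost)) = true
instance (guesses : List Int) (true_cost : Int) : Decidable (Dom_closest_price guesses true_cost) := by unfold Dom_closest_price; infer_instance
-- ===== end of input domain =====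

-- B replaces A's recursive fold (with guesses[1:] slicing) by sort-descending + early-exit scan; return values agree everywhere.

-- ===== PORT A =====
def closest_price (guesses : List Int) (true_cost : Int) : Int :=
  match guesses with
  | [] => 0
  | g :: rest =>            -- guesses[0], guesses[1:]
    if g ≤ true_cost then max g (closest_price rest true_cost)
    else closest_price rest true_cost

-- ===== PORT B =====
-- the for-loop with early return over the sorted list
def pvScanB (ys : List Int) (true_cost : Int) : Int :=
  match ys with
  | [] => 0
  | g :: rest => if 0 ≤ g ∧ g ≤ true_cost then g else pvScanB rest true_cost

def closest_price_alt (guesses : List Int) (true_cost : Int) : Int :=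
  pvScanB (PySem.List.sorted guesses (fun x => x) true) true_cost

-- ===== PRECONDITION & SPEC =====
def Spec_closest_price (guesses : List Int) (true_cost : Int) (out : Int) : Prop := out = closest_price_alt guesses true_cost
instance (guesses : List Int) (true_cost : Int) (out : Int) : Decidable (Spec_closest_price guesses true_cost out) := by unfold Spec_closest_price; infer_instance

-- ===== CLAIM (what is proved, stated in full; the proofs are below) =====
def Claim_equal_closest_price : Prop := ∀ (guesses : List Int) (true_cost : Int), Dom_closest_price guesses true_cost → Spec_closest_price guesses true_cost (closest_price guesses true_cost)

-- ===== LEMMAS AND PROOFS =====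

-- A's value is always nonnegative (the empty-list base case 0 propagates through max).
theorem closest_price_nonneg (xs : List Int) (t : Int) : 0 ≤ closest_price xs t := by
  induction xs with
  | nil => simp [closest_price]
  | cons g rest ih =>
    simp only [closest_price]
    split_ifs with h
    · exact le_trans ih (le_max_right _ _)
    · exact ih

-- A's value is bounded by any nonnegative upper bound of the list.
theorem closest_price_le (xs : List Int) (t b : Int) (hb : 0 ≤ b)
    (h : ∀ y ∈ xs, y ≤ b) : closest_price xs t ≤ b := by
  induction xs with
  | nil => simpa [closest_price] using hb
  | cons g rest ih =>
    simp only [closest_price]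
    have hg : g ≤ b := h g (by simp)
    have hrest : ∀ y ∈ rest, y ≤ b := fun y hy => h y (by simp [hy])
    split_ifs with hle
    · exact max_le hg (ih hrest)
    · exact ih hrest

-- A is invariant under permutation of the guesses.
theorem closest_price_perm (t : Int) {xs ys : List Int} (h : xs.Perm ys) :
    closest_price xs t = closest_price ys t := by
  induction h with
  | nil => rfl
  | cons x _ ih => simp only [closest_price]; rw [ih]
  | swap x y l =>
    simp only [closest_price]
    split_ifs <;> simp [max_left_comm]
  | trans _ _ ih1 ih2 => exact ih1.trans ih2

-- On a descending list, B's early-exit scan equals A's fold.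
theorem pvScanB_eq (t : Int) (ys : List Int)
    (h : ys.Pairwise (fun a b => b ≤ a)) : pvScanB ys t = closest_price ys t := by
  induction ys with
  | nil => rfl
  | cons g rest ih =>
    rcases List.pairwise_cons.mp h with ⟨hhead, htail⟩
    simp only [pvScanB, closest_price]
    by_cases hgt : g ≤ t
    · rw [if_pos hgt]
      by_cases hg0 : 0 ≤ g
      · rw [if_pos ⟨hg0, hgt⟩]
        have := closest_price_le rest t g hg0 hhead
        omega
      · rw [if_neg (by tauto)]
        have h0 := closest_price_nonneg rest t
        have : max g (closest_price rest t) = closest_price rest t := by omega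
        rw [this, ih htail]
    · rw [if_neg (by tauto), if_neg hgt, ih htail]

-- ===== VERDICT (by name: the statement is the Claim_ definition above) =====
theorem closest_price_spec : Claim_equal_closest_price := by
  intro guesses t _
  unfold Spec_closest_price closest_price_alt
  rw [pvScanB_eq t _ (PySem.List.sorted_pairwise_rev (xs := guesses) (key := fun x => x)),
    closest_price_perm t (PySem.List.sorted_perm guesses (fun x => x) true).symm]
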